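-- pv_equiv track=rewrite | github.com/Urgau/advent_of_code | 2020/Day 18/advent.py | pharentises
-- ===== SOURCE A (Python) =====
-- def pharentises(expr):
--     start = None
--     end = None
--     lvl = 0
--
--     for i, c in enumerate(expr):
--         if c == '(':
--             lvl += 1
--             if start is None:
--                 start = i
--         elif c == ')':
--             lvl -= 1
--             if lvl == 0:
--                 end = i
--                 break
--
--     return start, end
-- ===== SOURCE B (Python) =====
-- def pharentises(expr):
--     # Two independent passes: first '(' by a direct search; end by scanning
--     # cumulative parenthesis levels (from the string start, never reset).
--     start = next((i for i, c in enumerate(expr) if c == '('), None)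
--     lvl = 0
--     levels = []
--     for c in expr:
--         lvl += (c == '(') - (c == ')')
--         levels.append(lvl)
--     end = next((i for i, (c, l) in enumerate(zip(expr, levels))
--                 if c == ')' and l == 0), None)
--     return start, end
-- ===== Notes on version B (the rewrite author's own statement) =====
-- stated objective: alternative
-- what changed: Replaces A's single fused loop with shared mutable state (start/end/lvl plus break) by two independent passes: start is found by a direct search for the first opening parenthesis, and end by scanning a precomputed list of cumulative parenthesis levels for the first closing parenthesis at level zero.
import Mathlib
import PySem

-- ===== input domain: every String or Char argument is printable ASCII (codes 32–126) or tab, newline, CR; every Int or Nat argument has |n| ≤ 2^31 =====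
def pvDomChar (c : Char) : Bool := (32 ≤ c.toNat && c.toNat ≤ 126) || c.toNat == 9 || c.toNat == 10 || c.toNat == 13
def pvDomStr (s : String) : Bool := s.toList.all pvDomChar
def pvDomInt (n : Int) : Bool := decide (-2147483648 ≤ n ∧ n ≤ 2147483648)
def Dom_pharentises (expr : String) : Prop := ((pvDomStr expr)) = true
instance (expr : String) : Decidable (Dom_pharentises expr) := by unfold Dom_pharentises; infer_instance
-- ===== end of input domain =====

-- B replaces A's fused loop (shared start/end/lvl state, break) by two independent passes: alternative decomposition, same cost.

-- ===== PORT A =====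
-- A's for-loop over enumerate(expr) with early break, state (start, end, lvl).
def pharLoop : List (Int × Char) → Option Int → Option Int → Int → Option Int × Option Int
  | [], start, end_, _ => (start, end_)
  | (i, c) :: rest, start, end_, lvl =>
    if c = '(' then
      pharLoop rest (if start = none then some i else start) end_ (lvl + 1)
    else if c = ')' then
      if lvl - 1 = 0 then (start, some i)   -- break
      else pharLoop rest start end_ (lvl - 1)
    else pharLoop rest start end_ lvl

def pharentises (expr : String) : Option Int × Option Int :=
  pharLoop (PySem.List.enumerate expr.toList) none none 0

-- ===== PORT B =====
-- next((i for i, c in enumerate(expr) if c == '('), None)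
def firstOpen : Int → List Char → Option Int
  | _, [] => none
  | i, c :: rest => if c = '(' then some i else firstOpen (i + 1) rest

-- the levels list built by the for-loop (lvl += (c == '(') - (c == ')'))
def runLevels : Int → List Char → List Int
  | _, [] => []
  | lvl, c :: rest =>
    let l := lvl + (if c = '(' then 1 else 0) - (if c = ')' then 1 else 0)
    l :: runLevels l rest

-- next((i for i, (c, l) in enumerate(zip(expr, levels)) if c == ')' and l == 0), None)
def firstClose0 : Int → List (Char × Int) → Option Int
  | _, [] => none
  | i, (c, l) :: rest => if c = ')' ∧ l = 0 then some i else firstClose0 (i + 1) rest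

def pharentises_alt (expr : String) : Option Int × Option Int :=
  (firstOpen 0 expr.toList, firstClose0 0 (expr.toList.zip (runLevels 0 expr.toList)))

-- ===== PRECONDITION & SPEC =====
def Spec_pharentises (expr : String) (out : Option Int × Option Int) : Prop := out = pharentises_alt expr
instance (expr : String) (out : Option Int × Option Int) : Decidable (Spec_pharentises expr out) := by unfold Spec_pharentises; infer_instance

-- ===== CLAIM (what is proved, stated in full; the proofs are below) =====
def Claim_equal_pharentises : Prop := ∀ (expr : String), Dom_pharentises expr → Spec_pharentises expr (pharentises expr)

-- ===== LEMMAS AND PROOFS =====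

-- once start is set, the loop's first component is fixed and its second is the first ')' at cumulative level 0
theorem pharLoop_some (cs : List Char) : ∀ (i : Int) (s lvl : Int),
    pharLoop (PySem.List.enumerate cs i) (some s) none lvl
      = (some s, firstClose0 i (cs.zip (runLevels lvl cs))) := by
  induction cs with
  | nil => intro i s lvl; simp [PySem.List.enumerate_nil, pharLoop, runLevels, firstClose0]
  | cons c rest ih =>
    intro i s lvl
    rw [PySem.List.enumerate_cons]
    by_cases hc : c = '('
    · simp [pharLoop, hc, runLevels, firstClose0, ih]
    · by_cases hc2 : c = ')'
      · by_cases hl : lvl - 1 = 0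
        · simp [pharLoop, hc2, hl, runLevels, firstClose0]
        · simp [pharLoop, hc2, hl, runLevels, firstClose0, ih]
      · simp [pharLoop, hc, hc2, runLevels, firstClose0, ih]

-- before any '(' is seen the level is ≤ 0, no break fires, and start becomes the first '('
theorem pharLoop_none (cs : List Char) : ∀ (i lvl : Int), lvl ≤ 0 →
    pharLoop (PySem.List.enumerate cs i) none none lvl
      = (firstOpen i cs, firstClose0 i (cs.zip (runLevels lvl cs))) := by
  induction cs with
  | nil => intro i lvl _; simp [PySem.List.enumerate_nil, pharLoop, firstOpen, runLevels, firstClose0]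
  | cons c rest ih =>
    intro i lvl hlvl
    rw [PySem.List.enumerate_cons]
    by_cases hc : c = '('
    · simp [pharLoop, hc, firstOpen, runLevels, firstClose0, pharLoop_some]
    · by_cases hc2 : c = ')'
      · have hl : ¬ (lvl - 1 = 0) := by omega
        simp [pharLoop, hc2, hl, firstOpen, runLevels, firstClose0,
          ih _ (lvl - 1) (by omega)]
      · simp [pharLoop, hc, hc2, firstOpen, runLevels, firstClose0, ih _ lvl hlvl]

-- ===== VERDICT (by name: the statement is the Claim_ definition above) =====
theorem pharentises_spec : Claim_equal_pharentises := by
  intro expr _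
  show pharentises expr = pharentises_alt expr
  unfold pharentises pharentises_alt
  rw [pharLoop_none expr.toList 0 0 le_rfl]
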